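-- pv_equiv track=rewrite | github.com/krisx303/algorithms-data-structures | zadania z bit/bit 4/2_laczenie_napisow.py | lacz
-- ===== SOURCE A (Python) =====
-- def lacz(S: list[str], t: str) -> int:
--     d = len(t)
--     F = [-1 for _ in range(d)]
--
--     def f(i: int) -> int:
--         if i == d:
--             return 0
--         if i > d:
--             return -1
--         if F[i] != -1:
--             return F[i]
--         m = -1
--         for s in S:
--             if t[i:].startswith(s):
--                 o = f(i+len(s))
--                 if o == 0:
--                     m = max(m, len(s))
--                 if o != -1:
--                     m = max(m, min(o, len(s)))
--         F[i] = m
--         return m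
--
--     return f(0)
-- ===== SOURCE B (Python) =====
-- def lacz(S: list[str], t: str) -> int:
--     d = len(t)
--     G = [0] * (d + 1)
--     for i in range(d - 1, -1, -1):
--         m = -1
--         for s in S:
--             if s and t.startswith(s, i):
--                 o = G[i + len(s)]
--                 if o == 0:
--                     m = max(m, len(s))
--                 if o != -1:
--                     m = max(m, min(o, len(s)))
--         G[i] = m
--     return G[0]
-- ===== Notes on version B (the rewrite author's own statement) =====
-- stated objective: faster
-- what changed: Replaced the top-down memoized recursion (whose -1 memo sentinel collides with the -1 'impossible' value, so failing positions are recomputed exponentially) by a bottom-up iterative DP table filled from position d-1 down to 0, returning G[0]; B also skips empty words, on which A raises RecursionError (those inputs are outside Pre_).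
import Mathlib
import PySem

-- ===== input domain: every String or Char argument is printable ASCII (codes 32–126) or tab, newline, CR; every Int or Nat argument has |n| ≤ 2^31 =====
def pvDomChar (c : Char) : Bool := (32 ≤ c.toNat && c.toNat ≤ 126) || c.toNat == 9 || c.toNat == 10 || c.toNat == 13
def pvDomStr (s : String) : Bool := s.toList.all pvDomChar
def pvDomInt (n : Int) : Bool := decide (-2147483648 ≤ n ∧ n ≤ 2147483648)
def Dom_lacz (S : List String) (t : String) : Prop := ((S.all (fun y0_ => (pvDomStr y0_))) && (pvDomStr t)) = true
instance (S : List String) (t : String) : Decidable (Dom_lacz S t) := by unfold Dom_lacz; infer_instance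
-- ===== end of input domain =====

-- B replaces A's top-down memoized recursion by a bottom-up DP table (proved equal on Pre_;
-- the equivalence is about the return value only).

-- ===== PORT A =====
-- f(i) with the mutable memo list F threaded through; fuel only makes the recursion total in
-- Lean (Python has none); fuel t.length+1 suffices on Pre_ (no empty word), proved below.
mutual
  def laczFA (S : List String) (tl : List Char) (d : Nat) :
      Nat → Nat → List Int → Int × List Int
    | 0, _, F => (-1, F)                      -- fuel exhausted: unreachable under Pre_
    | Nat.succ fuel, i, F =>
      if i = d then (0, F)
      else if d < i then (-1, F)
      else if F.getD i (-1) ≠ -1 then (F.getD i (-1), F)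
      else
        let p := laczLoopA S tl d fuel S i (-1) F
        (p.1, p.2.set i p.1)
  termination_by fuel _ _ => (fuel, 0)
  -- the 'for s in S' loop of f
  def laczLoopA (S : List String) (tl : List Char) (d : Nat) (fuel : Nat) :
      List String → Nat → Int → List Int → Int × List Int
    | [], _, m, F => (m, F)
    | s :: rest, i, m, F =>
      if PySem.Chars.startswith (PySem.List.slice tl (some (i : Int)) none) s.toList then
        let r := laczFA S tl d fuel (i + s.toList.length) F
        let m1 := if r.1 = 0 then max m (s.toList.length : Int) else m
        let m2 := if r.1 ≠ -1 then max m1 (min r.1 (s.toList.length : Int)) else m1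
        laczLoopA S tl d fuel rest i m2 r.2
      else laczLoopA S tl d fuel rest i m F
  termination_by todo _ _ _ => (fuel, todo.length + 1)
end

def lacz (S : List String) (t : String) : Int :=
  (laczFA S t.toList t.toList.length (t.toList.length + 1) 0
    (List.replicate t.toList.length (-1))).1

-- ===== PORT B =====
-- one pass of B's inner 'for s in S' loop at position i, then G[i] = m
def laczStepB (S : List String) (tl : List Char) (G : List Int) (i : Nat) : List Int :=
  G.set i (S.foldl (fun m s =>
    -- 'if s and t.startswith(s, i)': exact for 0 ≤ i (startswith at i = prefix of drop i)
    if s.toList ≠ [] ∧ PySem.Chars.startswith (tl.drop i) s.toList = true then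
      let o := G.getD (i + s.toList.length) 0
      let m1 := if o = 0 then max m (s.toList.length : Int) else m
      if o ≠ -1 then max m1 (min o (s.toList.length : Int)) else m1
    else m) (-1))

def lacz_alt (S : List String) (t : String) : Int :=
  let d := t.toList.length
  -- 'for i in range(d-1, -1, -1)': indices d-1, d-2, …, 0
  let G := ((List.range d).reverse).foldl (laczStepB S t.toList) (List.replicate (d + 1) 0)
  G.getD 0 0

-- ===== PRECONDITION & SPEC =====
-- Pre_ excludes exactly the inputs on which A raises RecursionError: an empty word in S with a
-- non-empty target makes f(i) call f(i) forever.
def Pre_lacz (S : List String) (t : String) : Prop := t = "" ∨ "" ∉ S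
instance (S : List String) (t : String) : Decidable (Pre_lacz S t) := by
  unfold Pre_lacz; infer_instance

def pvWitness_lacz : List String × String := (["ab", "a"], "ab")

def Spec_lacz (S : List String) (t : String) (out : Int) : Prop := out = lacz_alt S t
instance (S : List String) (t : String) (out : Int) : Decidable (Spec_lacz S t out) := by
  unfold Spec_lacz; infer_instance

-- ===== CLAIM (what is proved, stated in full; the proofs are below) =====
def Claim_equal_lacz : Prop :=
  ∀ (S : List String) (t : String), Dom_lacz S t → Pre_lacz S t → Spec_lacz S t (lacz S t)

-- ===== LEMMAS AND PROOFS =====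

-- the common combine rule
def laczComb (m o L : Int) : Int :=
  let m1 := if o = 0 then max m L else m
  if o ≠ -1 then max m1 (min o L) else m1

-- A's match condition at position i
def laczM (tl : List Char) (i : Nat) (s : List Char) : Bool :=
  PySem.Chars.startswith (PySem.List.slice tl (some (i : Int)) none) s

-- the mathematical value of f(i), with explicit fuel
def laczG (S : List String) (tl : List Char) (d : Nat) : Nat → Nat → Int
  | 0, i => if i = d then 0 else -1
  | Nat.succ fuel, i =>
    if i = d then 0 else if d < i then -1 else
      S.foldl (fun m s =>
        if laczM tl i s.toList then
          laczComb m (laczG S tl d fuel (i + s.toList.length)) (s.toList.length : Int)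
        else m) (-1)

theorem lacz_foldl_congr {α β : Type} (L : List β) (f f' : α → β → α) (m : α)
    (h : ∀ s ∈ L, ∀ a, f a s = f' a s) : L.foldl f m = L.foldl f' m := by
  induction L generalizing m with
  | nil => rfl
  | cons s rest ih =>
    simp only [List.foldl_cons]
    rw [h s (by simp)]
    exact ih _ (fun x hx a => h x (by simp [hx]) a)

theorem laczM_bounds {tl : List Char} {i : Nat} {s : List Char} (hi : i ≤ tl.length)
    (h : laczM tl i s) : i + s.length ≤ tl.length := by
  unfold laczM at h
  rw [PySem.List.slice_from_natCast] at h
  rw [PySem.Chars.startswith_iff] at h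
  have := h.length_le
  simp [List.length_drop] at this
  omega

-- fuel irrelevance for laczG, given no empty word
theorem laczG_fuel (S : List String) (tl : List Char) (hS : ∀ s ∈ S, s.toList ≠ []) :
    ∀ fuel₁ fuel₂ i, tl.length - i < fuel₁ → tl.length - i < fuel₂ → i ≤ tl.length →
      laczG S tl tl.length fuel₁ i = laczG S tl tl.length fuel₂ i := by
  intro fuel₁
  induction fuel₁ with
  | zero => omega
  | succ fuel₁ ih =>
    intro fuel₂ i h1 h2 hile
    match fuel₂ with
    | 0 => omega
    | Nat.succ fuel₂ =>
      unfold laczG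
      by_cases hd : i = tl.length
      · simp [hd]
      · by_cases hlt : tl.length < i
        · simp [hd, hlt]
        · simp only [hd, hlt, if_false]
          apply lacz_foldl_congr
          intro s hs m
          by_cases hm : laczM tl i s.toList
          · have hb := laczM_bounds hile hm
            have hlen : 0 < s.toList.length := List.length_pos_iff.mpr (hS s hs)
            rw [if_pos hm, if_pos hm]
            rw [ih fuel₂ (i + s.toList.length) (by omega) (by omega) (by omega)]
          · rw [if_neg hm, if_neg hm]

-- canonical g
def laczg (S : List String) (tl : List Char) (i : Nat) : Int :=
  laczG S tl tl.length (tl.length + 1 - i) i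

theorem laczg_end (S : List String) (tl : List Char) : laczg S tl tl.length = 0 := by
  unfold laczg
  rw [show tl.length + 1 - tl.length = 1 from by omega]
  simp [laczG]

theorem laczg_unfold (S : List String) (tl : List Char) (hS : ∀ s ∈ S, s.toList ≠ [])
    (i : Nat) (hi : i < tl.length) :
    laczg S tl i = S.foldl (fun m s =>
      if laczM tl i s.toList then
        laczComb m (laczg S tl (i + s.toList.length)) (s.toList.length : Int)
      else m) (-1) := by
  conv_lhs => unfold laczg
  rw [show tl.length + 1 - i = (tl.length - i) + 1 from by omega]
  have hd : ¬ i = tl.length := by omega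
  have hlt : ¬ tl.length < i := by omega
  simp only [laczG, hd, hlt, if_false]
  apply lacz_foldl_congr
  intro s hs m
  by_cases hm : laczM tl i s.toList
  · have hb := laczM_bounds (by omega) hm
    have hlen : 0 < s.toList.length := List.length_pos_iff.mpr (hS s hs)
    rw [if_pos hm, if_pos hm]
    unfold laczg
    rw [laczG_fuel S tl hS (tl.length - i) (tl.length + 1 - (i + s.toList.length))
      (i + s.toList.length) (by omega) (by omega) (by omega)]
  · rw [if_neg hm, if_neg hm]

-- memo invariant for A
def laczInv (S : List String) (tl : List Char) (F : List Int) : Prop :=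
  F.length = tl.length ∧
  ∀ j, j < tl.length → (F.getD j (-1) = -1 ∨ F.getD j (-1) = laczg S tl j)

theorem lacz_getD_set (F : List Int) (i j : Nat) (v dflt : Int) :
    (F.set i v).getD j dflt = if i = j ∧ i < F.length then v else F.getD j dflt := by
  by_cases h : i = j ∧ i < F.length
  · obtain ⟨rfl, hlt⟩ := h
    simp [List.getD, hlt]
  · simp only [if_neg h]
    by_cases hij : i = j
    · subst hij
      have : ¬ i < F.length := by tauto
      simp [List.getD, this]
    · simp [List.getD, List.getElem?_set_ne hij]

-- A computes laczg and preserves the memo invariant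
theorem laczFA_correct (S : List String) (tl : List Char) (hS : ∀ s ∈ S, s.toList ≠ []) :
    ∀ fuel i F, tl.length - i < fuel → i ≤ tl.length → laczInv S tl F →
      (laczFA S tl tl.length fuel i F).1 = laczg S tl i ∧
      laczInv S tl (laczFA S tl tl.length fuel i F).2 := by
  intro fuel
  induction fuel with
  | zero => omega
  | succ fuel ih =>
    intro i F hfuel hile hInv
    by_cases hd : i = tl.length
    · subst hd
      unfold laczFA
      simp [laczg_end]
      exact hInv
    · have hi : i < tl.length := by omega
      have hlt : ¬ tl.length < i := by omega
      unfold laczFA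
      simp only [hd, hlt, if_false]
      by_cases hmemo : F.getD i (-1) ≠ -1
      · rw [if_pos hmemo]
        rcases (hInv.2 i hi) with h | h
        · exact absurd h hmemo
        · exact ⟨h, hInv⟩
      · rw [if_neg hmemo]
        -- the loop: an inner induction over the word list
        have loop : ∀ todo, (∀ s ∈ todo, s ∈ S) → ∀ m F', laczInv S tl F' →
            (laczLoopA S tl tl.length fuel todo i m F').1 =
              todo.foldl (fun m s =>
                if laczM tl i s.toList then
                  laczComb m (laczg S tl (i + s.toList.length)) (s.toList.length : Int)
                else m) m ∧
            laczInv S tl (laczLoopA S tl tl.length fuel todo i m F').2 := by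
          intro todo
          induction todo with
          | nil =>
            intro _ m F' hInv'
            simp only [laczLoopA, List.foldl_nil]
            exact ⟨trivial, hInv'⟩
          | cons s rest ihl =>
            intro hsub m F' hInv'
            have hsS : s ∈ S := hsub s (by simp)
            by_cases hm : laczM tl i s.toList
            · have hb := laczM_bounds (show i ≤ tl.length by omega) hm
              have hlen : 0 < s.toList.length := List.length_pos_iff.mpr (hS s hsS)
              have hr := ih (i + s.toList.length) F' (by omega) (by omega) hInv'
              have hm' : PySem.Chars.startswith
                  (PySem.List.slice tl (some (i : Int)) none) s.toList = true := hm
              simp only [laczLoopA, List.foldl_cons, laczComb]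
              rw [if_pos hm', if_pos hm, hr.1]
              exact ihl (fun x hx => hsub x (by simp [hx])) _ _ hr.2
            · have hm' : ¬ PySem.Chars.startswith
                  (PySem.List.slice tl (some (i : Int)) none) s.toList = true := hm
              simp only [laczLoopA, List.foldl_cons]
              rw [if_neg hm', if_neg hm]
              exact ihl (fun x hx => hsub x (by simp [hx])) m F' hInv'
        have hres := loop S (fun s hs => hs) (-1) F hInv
        have hval : (laczLoopA S tl tl.length fuel S i (-1) F).1 = laczg S tl i := by
          rw [hres.1, ← laczg_unfold S tl hS i hi]
        refine ⟨hval, ?_⟩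
        show laczInv S tl ((laczLoopA S tl tl.length fuel S i (-1) F).2.set i
          (laczLoopA S tl tl.length fuel S i (-1) F).1)
        obtain ⟨hlenF, hmem⟩ := hres.2
        refine ⟨by simp [hlenF], ?_⟩
        intro j hj
        rw [lacz_getD_set]
        by_cases hij : i = j
        · subst hij
          rw [if_pos ⟨rfl, by rw [hlenF]; omega⟩]
          right
          rw [hval]
        · rw [if_neg (by tauto)]
          exact hmem j hj

-- B's table invariant: processing indices k-1 … 0 from a table correct on [k, d]
theorem laczB_table (S : List String) (tl : List Char) (hS : ∀ s ∈ S, s.toList ≠ []) :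
    ∀ k, k ≤ tl.length → ∀ G, G.length = tl.length + 1 →
      (∀ j, k ≤ j → j ≤ tl.length → G.getD j 0 = laczg S tl j) →
      (∀ j, j ≤ tl.length →
        (((List.range k).reverse).foldl (laczStepB S tl) G).getD j 0 = laczg S tl j) := by
  intro k
  induction k with
  | zero =>
    intro _ G _ hG j hj
    simpa using hG j (by omega) hj
  | succ k ih =>
    intro hk G hGlen hG
    rw [List.range_succ, List.reverse_append]
    simp only [List.reverse_cons, List.reverse_nil, List.nil_append, List.singleton_append,
      List.foldl_cons]
    apply ih (by omega)
    · simp [laczStepB, hGlen]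
    · intro j hkj hjd
      unfold laczStepB
      rw [lacz_getD_set]
      by_cases hkj' : k = j
      · subst hkj'
        rw [if_pos ⟨rfl, by rw [hGlen]; omega⟩]
        rw [laczg_unfold S tl hS k (by omega)]
        apply lacz_foldl_congr
        intro s hs m
        have hne : s.toList ≠ [] := hS s hs
        have hdrop : PySem.List.slice tl (some (k : Int)) none = tl.drop k :=
          PySem.List.slice_from_natCast tl k
        by_cases hm : laczM tl k s.toList
        · have hb := laczM_bounds (by omega) hm
          have hm2 : s.toList ≠ [] ∧ PySem.Chars.startswith (tl.drop k) s.toList = true := by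
            refine ⟨hne, ?_⟩
            unfold laczM at hm
            rwa [hdrop] at hm
          rw [if_pos hm, if_pos hm2]
          have hlen : 0 < s.toList.length := List.length_pos_iff.mpr hne
          have hG' : G.getD (k + s.toList.length) 0 = laczg S tl (k + s.toList.length) :=
            hG _ (by omega) (by omega)
          simp only [laczComb, List.getD] at hG' ⊢
          simp only [hG']
        · have hm2 : ¬ (s.toList ≠ [] ∧ PySem.Chars.startswith (tl.drop k) s.toList = true) := by
            intro ⟨_, h2⟩
            exact hm (by unfold laczM; rwa [hdrop])
          rw [if_neg hm, if_neg hm2]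
      · rw [if_neg (by tauto)]
        exact hG j (by omega) hjd

theorem lacz_eq_alt (S : List String) (t : String) (hS : ∀ s ∈ S, s.toList ≠ []) :
    lacz S t = lacz_alt S t := by
  unfold lacz lacz_alt
  set tl := t.toList
  have hInv0 : laczInv S tl (List.replicate tl.length (-1)) := by
    refine ⟨by simp, ?_⟩
    intro j hj
    left
    simp [List.getD, hj]
  have hA := laczFA_correct S tl hS (tl.length + 1) 0
    (List.replicate tl.length (-1)) (by omega) (by omega) hInv0
  rw [hA.1]
  have hB := laczB_table S tl hS tl.length (le_refl _) (List.replicate (tl.length + 1) 0)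
    (by simp) ?_ 0 (by omega)
  · exact hB.symm
  · intro j hj hjd
    have hjd' : j = tl.length := by omega
    subst hjd'
    rw [laczg_end]
    simp [List.getD]

-- ===== VERDICT (by name: the statement is the Claim_ definition above) =====
theorem laczFA_end (S : List String) (tl : List Char) (fuel : Nat) (F : List Int) :
    laczFA S tl tl.length (fuel + 1) tl.length F = (0, F) := by
  unfold laczFA
  simp

theorem lacz_spec : Claim_equal_lacz := by
  intro S t _ hPre
  unfold Spec_lacz
  rcases hPre with ht | hS
  · subst ht
    unfold lacz lacz_alt
    have ht0 : ("" : String).toList = ([] : List Char) := by simp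
    have h1 := laczFA_end S ([] : List Char) 0 (List.replicate ([] : List Char).length (-1))
    simp only [List.length_nil] at h1
    simp only [ht0, List.length_nil]
    rw [h1]
    simp
  · refine lacz_eq_alt S t ?_
    intro s hs hnil
    exact hS (String.toList_eq_nil_iff.mp hnil ▸ hs)
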